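-- pv_equiv track=rewrite | github.com/Tharique007/python-preactice-Basics | Array/Array_103.py | nthHypenumber
-- ===== SOURCE A (Python) =====
-- def nthHypenumber(numn):
--     count=0
--     list1=[2,3,5,7]
--     num = 2
--     while count < numn:
--         rep = 0
--         for i in str(num):
--             if int(i) not in list1:
--                 num +=1
--                 break
--             else:
--                 rep +=1
--         if rep == len(str(num)):
--             count += 1
--             if count != numn:
--                 num +=1
--
--     return num
-- ===== SOURCE B (Python) =====
-- def nthHypenumber(numn):
--     # n-th positive integer whose decimal digits all lie in {2, 3, 5, 7}:
--     # bijective base-4 expansion of numn over the digit alphabet (2, 3, 5, 7),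
--     # built least-significant digit first.
--     n = numn
--     val = 0
--     place = 1
--     while n > 0:
--         n, r = divmod(n - 1, 4)
--         val += (2, 3, 5, 7)[r] * place
--         place *= 10
--     return val
-- ===== Notes on version B (the rewrite author's own statement) =====
-- stated objective: faster
-- what changed: A scans every integer upward from 2 and tests each one's decimal digits until the numn-th all-{2,3,5,7} number is found; B computes that number directly as the bijective base-4 expansion of numn over the digit alphabet (2,3,5,7), one digit per loop step. Pre_ excludes non-positive numn, where no n-th element exists and any returned sentinel is an arbitrary convention (A yields its initial candidate 2, B yields the empty encoding 0).
-- outside the precondition, e.g. on nthHypenumber(0): A returns 2, B returns 0; on nthHypenumber(-3): A returns 2, B returns 0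
import Mathlib
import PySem

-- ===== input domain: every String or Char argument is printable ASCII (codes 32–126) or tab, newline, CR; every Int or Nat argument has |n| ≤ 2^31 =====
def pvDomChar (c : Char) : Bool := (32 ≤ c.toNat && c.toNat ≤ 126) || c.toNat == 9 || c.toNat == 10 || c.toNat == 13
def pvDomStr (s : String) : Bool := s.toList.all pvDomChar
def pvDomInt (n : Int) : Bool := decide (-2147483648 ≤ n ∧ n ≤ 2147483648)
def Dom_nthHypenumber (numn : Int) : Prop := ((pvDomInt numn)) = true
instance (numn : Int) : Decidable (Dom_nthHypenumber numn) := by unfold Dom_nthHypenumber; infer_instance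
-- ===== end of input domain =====

-- B replaces A's linear upward scan by the bijective base-4 encoding of numn over (2,3,5,7); objective: faster.


-- ===== PORT A =====
-- the inner `for i in str(num)` loop with its break; returns the final (rep, num).
-- The `none` branch is unreachable here (num stays ≥ 2, so every char of str(num) is a
-- decimal digit and int(i) succeeds); it is treated like the break for totality.
def innerA : List Char → Int → Int → Int × Int
  | [], rep, num => (rep, num)
  | c :: cs, rep, num =>
      match PySem.Int.ofChars? [c] with
      | some d => if d ∉ ([2, 3, 5, 7] : List Int) then (rep, num + 1)
                  else innerA cs (rep + 1) num
      | none => (rep, num + 1)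

-- the `while count < numn` loop; fuel is a totality guard only (the proof shows
-- 10*numn²+1 steps always suffice to reach the normal exit).
def loopA : Nat → Int → Int → Int → Int
  | 0, _, num, _ => num
  | fuel + 1, count, num, numn =>
      if count < numn then
        let p := innerA (PySem.Int.toChars num) 0 num
        if p.1 = PySem.List.len (PySem.Int.toChars p.2) then
          if count + 1 ≠ numn then loopA fuel (count + 1) (p.2 + 1) numn
          else loopA fuel (count + 1) p.2 numn
        else loopA fuel count p.2 numn
      else num

def nthHypenumber (numn : Int) : Int :=
  loopA (10 * numn.toNat * numn.toNat + 1) 0 2 numn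

-- ===== PORT B =====
-- the tuple (2, 3, 5, 7) of Source B
def hypeDigits : List Int := [2, 3, 5, 7]

-- Source B's while loop; the index r of the tuple lookup is always in [0,4), so the
-- default of pyGetD is never used.
def loopB (n val place : Int) : Int :=
  if h : 0 < n then
    loopB (PySem.Int.floordiv (n - 1) 4)
      (val + PySem.List.pyGetD hypeDigits (PySem.Int.mod (n - 1) 4) 0 * place)
      (place * 10)
  else val
termination_by n.toNat
decreasing_by
  have h4 : (0:Int) < 4 := by norm_num
  rw [PySem.Int.floordiv_eq_ediv_of_pos h4]
  omega

def nthHypenumber_alt (numn : Int) : Int := loopB numn 0 1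

-- ===== PRECONDITION & SPEC =====
-- Pre_ excludes non-positive numn, where no n-th element exists and any returned
-- sentinel is an arbitrary convention (A yields its initial candidate 2, B yields
-- the empty encoding 0).
def Pre_nthHypenumber (numn : Int) : Prop := 1 ≤ numn
instance (numn : Int) : Decidable (Pre_nthHypenumber numn) := by unfold Pre_nthHypenumber; infer_instance
def pvWitness_nthHypenumber : Int := 3

def Spec_nthHypenumber (numn : Int) (out : Int) : Prop := out = nthHypenumber_alt numn
instance (numn : Int) (out : Int) : Decidable (Spec_nthHypenumber numn out) := by unfold Spec_nthHypenumber; infer_instance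

-- ===== CLAIM (what is proved, stated in full; the proofs are below) =====
def Claim_equal_nthHypenumber : Prop := ∀ (numn : Int), Dom_nthHypenumber numn → Pre_nthHypenumber numn → Spec_nthHypenumber numn (nthHypenumber numn)

-- ===== LEMMAS AND PROOFS =====

-- big-endian decimal digit characters of n (shown below to agree with str())
def digitsBE (n : Nat) : List Char :=
  if h : n < 10 then [Nat.digitChar n]
  else digitsBE (n / 10) ++ [Nat.digitChar (n % 10)]
termination_by n
decreasing_by omega

-- a char the scan accepts
def goodChar (c : Char) : Bool := c = '2' || c = '3' || c = '5' || c = '7'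

-- n is a "hype" number: every decimal digit is 2, 3, 5 or 7
def hypeL (n : Nat) : Bool := (digitsBE n).all goodChar

-- the hype digit of index r
def hdig (r : Nat) : Nat := if r = 0 then 2 else if r = 1 then 3 else if r = 2 then 5 else 7

-- e n = the n-th hype number (bijective base-4 over (2,3,5,7)); e 0 = 0
def e (n : Nat) : Nat :=
  if h : n = 0 then 0
  else 10 * e ((n - 1) / 4) + hdig ((n - 1) % 4)
termination_by n
decreasing_by omega

theorem tdc_eq (f : Nat) : ∀ (n : Nat) (ds : List Char), 0 < f → n < 10 ^ f →
    Nat.toDigitsCore 10 f n ds = digitsBE n ++ ds := by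
  induction f with
  | zero => intro n ds h; omega
  | succ f ih =>
    intro n ds _ hlt
    rw [Nat.toDigitsCore]
    by_cases h10 : n / 10 = 0
    · have hn : n < 10 := by omega
      simp only [h10, if_pos rfl]
      rw [digitsBE, dif_pos hn]
      have : n % 10 = n := Nat.mod_eq_of_lt hn
      simp [this]
    · rw [if_neg h10]
      have hf : 0 < f := by
        rcases Nat.eq_zero_or_pos f with hf0 | hf
        · subst hf0; simp at hlt; omega
        · exact hf
      have hdiv : n / 10 < 10 ^ f := by
        have : n < 10 ^ (f + 1) := hlt
        rw [pow_succ] at this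
        exact Nat.div_lt_of_lt_mul (by omega)
      have hn : ¬ n < 10 := by omega
      conv_rhs => rw [digitsBE, dif_neg hn]
      rw [ih (n / 10) (Nat.digitChar (n % 10) :: ds) hf hdiv]
      simp

theorem toChars_eq (m : Nat) : PySem.Int.toChars (m : Int) = digitsBE m := by
  have h1 : ¬ ((m : Int) < 0) := by omega
  rw [PySem.Int.toChars, if_neg h1]
  have h2 : ((m:Int)).toNat = m := Int.toNat_natCast m
  rw [h2, Nat.toDigits]
  have h3 : m < 2 ^ m := Nat.lt_two_pow_self
  have h4 : 2 ^ m ≤ 10 ^ m := Nat.pow_le_pow_left (by norm_num) m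
  have h5 : 10 ^ m ≤ 10 ^ (m + 1) := Nat.pow_le_pow_right (by norm_num) (by omega)
  rw [tdc_eq (m + 1) m [] (by omega) (by omega)]
  simp

theorem digitsBE_digits (n : Nat) : ∀ c ∈ digitsBE n, ∃ d, d < 10 ∧ c = Nat.digitChar d := by
  induction n using Nat.strong_induction_on with
  | _ n ih =>
    rw [digitsBE]
    by_cases h : n < 10
    · rw [dif_pos h]
      intro c hc
      simp at hc
      exact ⟨n, h, hc⟩
    · rw [dif_neg h]
      intro c hc
      rw [List.mem_append] at hc
      rcases hc with hc | hc
      · exact ih (n / 10) (by omega) c hc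
      · simp at hc
        exact ⟨n % 10, by omega, hc⟩

theorem ofChars?_digitChar (d : Nat) (h : d < 10) :
    PySem.Int.ofChars? [Nat.digitChar d] = some (d : Int) := by
  interval_cases d <;> decide

theorem goodChar_digitChar (d : Nat) (h : d < 10) :
    (goodChar (Nat.digitChar d) = true) ↔ (d : Int) ∈ ([2, 3, 5, 7] : List Int) := by
  interval_cases d <;> decide

theorem len_digitsBE (n : Nat) : (digitsBE n).length = Nat.log 10 n + 1 := by
  induction n using Nat.strong_induction_on with
  | _ n ih =>
    rw [digitsBE]
    by_cases h : n < 10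
    · rw [dif_pos h]
      simp [Nat.log_eq_zero_iff, h]
    · rw [dif_neg h]
      simp only [List.length_append, List.length_singleton]
      rw [ih (n / 10) (by omega)]
      have h1 := Nat.log_div_base 10 n
      have hlog : 0 < Nat.log 10 n := Nat.log_pos (by norm_num) (by omega)
      omega



theorem innerA_cons_digit (d : Nat) (hd : d < 10) (cs : List Char) (rep num : Int) :
    innerA (Nat.digitChar d :: cs) rep num =
      if (d : Int) ∈ ([2, 3, 5, 7] : List Int) then innerA cs (rep + 1) num
      else (rep, num + 1) := by
  rw [innerA, ofChars?_digitChar d hd]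
  by_cases h : (d : Int) ∈ ([2, 3, 5, 7] : List Int) <;> simp [h]

theorem innerA_all (cs : List Char) (hd : ∀ c ∈ cs, ∃ d, d < 10 ∧ c = Nat.digitChar d)
    (hg : cs.all goodChar = true) : ∀ (rep num : Int),
    innerA cs rep num = (rep + cs.length, num) := by
  induction cs with
  | nil => intro rep num; simp [innerA]
  | cons c cs ih =>
    intro rep num
    obtain ⟨d, hdlt, rfl⟩ := hd c (by simp)
    simp only [List.all_cons, Bool.and_eq_true] at hg
    have hmem := (goodChar_digitChar d hdlt).mp hg.1
    rw [innerA_cons_digit d hdlt, if_pos hmem,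
        ih (fun c hc => hd c (by simp [hc])) hg.2]
    simp only [List.length_cons, Prod.mk.injEq]
    exact ⟨by push_cast; ring, trivial⟩

theorem innerA_bad (cs : List Char) (hd : ∀ c ∈ cs, ∃ d, d < 10 ∧ c = Nat.digitChar d)
    (hg : cs.all goodChar = false) : ∀ (rep num : Int),
    (innerA cs rep num).2 = num + 1 ∧ (innerA cs rep num).1 < rep + cs.length := by
  induction cs with
  | nil => intro rep num; simp at hg
  | cons c cs ih =>
    intro rep num
    obtain ⟨d, hdlt, rfl⟩ := hd c (by simp)
    rw [innerA_cons_digit d hdlt]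
    by_cases hgc : goodChar (Nat.digitChar d) = true
    · have hmem := (goodChar_digitChar d hdlt).mp hgc
      rw [if_pos hmem]
      simp only [List.all_cons, hgc, Bool.true_and] at hg
      have h2 := ih (fun c hc => hd c (by simp [hc])) hg (rep + 1) num
      refine ⟨h2.1, ?_⟩
      have := h2.2
      simp only [List.length_cons]
      push_cast
      omega
    · have hmem : (d : Int) ∉ ([2, 3, 5, 7] : List Int) := fun hm =>
        hgc ((goodChar_digitChar d hdlt).mpr hm)
      rw [if_neg hmem]
      refine ⟨rfl, ?_⟩
      simp only [List.length_cons]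
      push_cast
      omega

theorem hdig_lt (r : Nat) : hdig r < 10 := by unfold hdig; split_ifs <;> norm_num

theorem digitsBE_split (h d : Nat) (hd : d < 10) (hh : 0 < h) :
    digitsBE (10 * h + d) = digitsBE h ++ [Nat.digitChar d] := by
  have h1 : (10 * h + d) / 10 = h := by omega
  have h2 : (10 * h + d) % 10 = d := by omega
  rw [digitsBE, dif_neg (by omega), h1, h2]

theorem e_zero : e 0 = 0 := by rw [e]; simp

theorem e_succ (n : Nat) : e (n + 1) = 10 * e (n / 4) + hdig (n % 4) := by
  rw [e, dif_neg (by omega)]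
  simp

theorem e_one : e 1 = 2 := by rw [e_succ]; norm_num [e_zero, hdig]
theorem e_two : e 2 = 3 := by rw [e_succ]; norm_num [e_zero, hdig]
theorem e_three : e 3 = 5 := by rw [e_succ]; norm_num [e_zero, hdig]
theorem e_four : e 4 = 7 := by rw [e_succ]; norm_num [e_zero, hdig]

theorem e_lt_succ (n : Nat) : e n < e (n + 1) := by
  induction n using Nat.strong_induction_on with
  | _ n ih =>
    by_cases h0 : n = 0
    · subst h0; rw [e_zero, e_one]; norm_num
    · obtain ⟨m, rfl⟩ : ∃ m, n = m + 1 := ⟨n - 1, by omega⟩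
      rw [e_succ m, e_succ (m + 1)]
      by_cases hr : m % 4 < 3
      · have h1 : (m + 1) / 4 = m / 4 := by omega
        have h2 : (m + 1) % 4 = m % 4 + 1 := by omega
        rw [h1, h2]
        have h3 : hdig (m % 4) < hdig (m % 4 + 1) := by
          have h4 : m % 4 = 0 ∨ m % 4 = 1 ∨ m % 4 = 2 := by omega
          rcases h4 with h | h | h <;> rw [h] <;> norm_num [hdig]
        omega
      · have hr3 : m % 4 = 3 := by omega
        have h1 : (m + 1) / 4 = m / 4 + 1 := by omega
        have h2 : (m + 1) % 4 = 0 := by omega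
        rw [h1, h2, hr3]
        have h5 := ih (m / 4) (by omega)
        have ha : hdig 3 = 7 := by norm_num [hdig]
        have hb : hdig 0 = 2 := by norm_num [hdig]
        omega

theorem e_mono : StrictMono e := strictMono_nat_of_lt_succ e_lt_succ

theorem hypeL_zero : hypeL 0 = false := by
  unfold hypeL
  rw [digitsBE, dif_pos (by norm_num)]
  decide

theorem hype_surj (m : Nat) (h : hypeL m = true) : ∃ n, 1 ≤ n ∧ e n = m := by
  induction m using Nat.strong_induction_on with
  | _ m ih =>
    have hm0 : m ≠ 0 := by rintro rfl; rw [hypeL_zero] at h; cases h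
    by_cases hlt : m < 10
    · have hg : goodChar (Nat.digitChar m) = true := by
        unfold hypeL at h
        rw [digitsBE, dif_pos hlt] at h
        simpa using h
      have hm : m = 2 ∨ m = 3 ∨ m = 5 ∨ m = 7 := by
        interval_cases m <;> revert hg <;> decide
      rcases hm with rfl | rfl | rfl | rfl
      · exact ⟨1, by norm_num, e_one⟩
      · exact ⟨2, by norm_num, e_two⟩
      · exact ⟨3, by norm_num, e_three⟩
      · exact ⟨4, by norm_num, e_four⟩
    · have hsplit : m = 10 * (m / 10) + m % 10 := by omega
      have hh : 0 < m / 10 := by omega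
      unfold hypeL at h
      rw [hsplit, digitsBE_split _ _ (by omega) hh, List.all_append] at h
      simp only [Bool.and_eq_true] at h
      have hgood : goodChar (Nat.digitChar (m % 10)) = true := by simpa using h.2
      obtain ⟨q, hq1, hq2⟩ := ih (m / 10) (by omega) h.1
      have hmod : m % 10 = 2 ∨ m % 10 = 3 ∨ m % 10 = 5 ∨ m % 10 = 7 := by
        have h10 : m % 10 < 10 := by omega
        interval_cases h : m % 10 <;> revert hgood <;> decide
      have hd : ∃ r, r < 4 ∧ hdig r = m % 10 := by
        rcases hmod with h' | h' | h' | h'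
        · exact ⟨0, by norm_num, by rw [h']; norm_num [hdig]⟩
        · exact ⟨1, by norm_num, by rw [h']; norm_num [hdig]⟩
        · exact ⟨2, by norm_num, by rw [h']; norm_num [hdig]⟩
        · exact ⟨3, by norm_num, by rw [h']; norm_num [hdig]⟩
      obtain ⟨r, hr4, hr⟩ := hd
      refine ⟨4 * q + r + 1, by omega, ?_⟩
      rw [e_succ]
      have h1 : (4 * q + r) / 4 = q := by omega
      have h2 : (4 * q + r) % 4 = r := by omega
      rw [h1, h2, hq2, hr]
      omega

theorem goodChar_hdig (r : Nat) : goodChar (Nat.digitChar (hdig r)) = true := by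
  unfold hdig; split_ifs <;> decide

theorem e_ge_two (n : Nat) (h : 1 ≤ n) : 2 ≤ e n := by
  have h1 : e 1 ≤ e n := e_mono.le_iff_le.mpr h
  have : e 1 = 2 := by simp [e, hdig]
  omega

theorem e_hype (n : Nat) (h : 1 ≤ n) : hypeL (e n) = true := by
  induction n using Nat.strong_induction_on with
  | _ n ih =>
    rw [e, dif_neg (by omega)]
    by_cases hq : (n - 1) / 4 = 0
    · rw [hq]
      have : e 0 = 0 := by simp [e]
      rw [this]
      unfold hypeL
      rw [Nat.mul_zero, Nat.zero_add, digitsBE, dif_pos (hdig_lt _)]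
      simp [goodChar_hdig]
    · unfold hypeL
      rw [digitsBE_split _ _ (hdig_lt _) (by
        have := e_ge_two ((n-1)/4) (by omega); omega)]
      rw [List.all_append]
      have hih := ih ((n-1)/4) (by omega) (by omega)
      unfold hypeL at hih
      simp [hih, goodChar_hdig]

theorem e_gap (n m : Nat) (h1 : e n < m) (h2 : m < e (n + 1)) : hypeL m = false := by
  by_contra hb
  have hb' : hypeL m = true := by
    cases hy : hypeL m
    · exact absurd hy hb
    · rfl
  obtain ⟨k, hk1, hk2⟩ := hype_surj m hb'
  subst hk2
  have := e_mono.lt_iff_lt.mp h1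
  have := e_mono.lt_iff_lt.mp h2
  omega

theorem e_bound (n : Nat) (h : 1 ≤ n) : e n ≤ 10 * n * n := by
  induction n using Nat.strong_induction_on with
  | _ n ih =>
    rw [e, dif_neg (by omega)]
    set q := (n - 1) / 4 with hq
    have hdl : hdig ((n-1) % 4) < 10 := hdig_lt _
    by_cases hq0 : q = 0
    · rw [hq0]
      have : e 0 = 0 := by simp [e]
      rw [this]
      nlinarith
    · have hih := ih q (by omega) (by omega)
      have hn : 4 * q + 1 ≤ n := by omega
      nlinarith


theorem toChars_eq' (num : Int) (h : 0 ≤ num) :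
    PySem.Int.toChars num = digitsBE num.toNat := by
  have hn : num = ((num.toNat : Nat) : Int) := by omega
  conv_lhs => rw [hn]
  exact toChars_eq num.toNat

theorem len_digitsBE_mono {a b : Nat} (h : a ≤ b) :
    (digitsBE a).length ≤ (digitsBE b).length := by
  rw [len_digitsBE, len_digitsBE]
  have := Nat.log_mono_right (b := 10) h
  omega

theorem getD_hypeDigits (r : Nat) (h : r < 4) :
    hypeDigits.getD r 0 = ((hdig r : Nat) : Int) := by
  interval_cases r <;> norm_num [hypeDigits, hdig]

theorem loopA_inv (fuel : Nat) : ∀ (count num numn : Int),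
    0 ≤ count → count < numn → 0 ≤ num →
    e count.toNat < num.toNat → num.toNat ≤ e (count.toNat + 1) →
    e numn.toNat + 2 ≤ fuel + num.toNat →
    loopA fuel count num numn = ((e numn.toNat : Nat) : Int) := by
  induction fuel with
  | zero =>
    intro count num numn h0 h1 h2 h3 h4 h5
    exfalso
    have hcn : count.toNat + 1 ≤ numn.toNat := by omega
    have h6 := e_mono.le_iff_le.mpr hcn
    omega
  | succ f ih =>
    intro count num numn h0 h1 h2 h3 h4 h5
    have hC1K : count.toNat + 1 ≤ numn.toNat := by omega
    have heCK := e_mono.le_iff_le.mpr hC1K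
    set N := num.toNat with hNdef
    have hnum : num = ((N : Nat) : Int) := by omega
    by_cases hhy : N = e (count.toNat + 1)
    · -- num is the next hype number
      have hhype : hypeL N = true := by rw [hhy]; exact e_hype _ (by omega)
      have hinner : innerA (PySem.Int.toChars num) 0 num
          = ((0 : Int) + (digitsBE N).length, num) := by
        rw [toChars_eq' num h2]; exact innerA_all _ (digitsBE_digits N) hhype 0 num
      simp only [loopA, if_pos h1, hinner]
      rw [toChars_eq' num h2, PySem.List.len_eq]
      rw [if_pos (by push_cast; ring)]
      by_cases hlast : count + 1 = numn
      · rw [if_neg (by simpa using hlast)]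
        have hKC : numn.toNat = count.toNat + 1 := by omega
        have hNK : N = e numn.toNat := by rw [hKC]; exact hhy
        have hf : 1 ≤ f := by omega
        obtain ⟨f2, rfl⟩ : ∃ f2, f = f2 + 1 := ⟨f - 1, by omega⟩
        simp only [loopA]
        rw [if_neg (by omega : ¬ (count + 1 < numn))]
        omega
      · rw [if_pos hlast]
        have ht1 : (count + 1).toNat = count.toNat + 1 := by omega
        have ht2 : (num + 1).toNat = N + 1 := by omega
        apply ih (count + 1) (num + 1) numn (by omega) (by omega) (by omega)
        · rw [ht1, ht2]; omega
        · rw [ht1, ht2]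
          have := e_lt_succ (count.toNat + 1)
          omega
        · rw [ht2]; omega
    · -- num is not hype: skip it
      have hNlt : N < e (count.toNat + 1) := by omega
      have hbad : hypeL N = false := e_gap count.toNat N h3 hNlt
      have hb := innerA_bad (digitsBE N) (digitsBE_digits N) hbad 0 num
      simp only [loopA, if_pos h1]
      rw [toChars_eq' num h2, ← hNdef, hb.1]
      have ht2 : (num + 1).toNat = N + 1 := by omega
      rw [toChars_eq' (num + 1) (by omega), ht2, PySem.List.len_eq]
      have hlen : (digitsBE N).length ≤ (digitsBE (N + 1)).length :=
        len_digitsBE_mono (by omega)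
      rw [if_neg (by
        have := hb.2
        push_cast at this ⊢
        omega)]
      apply ih count (num + 1) numn h0 h1 (by omega)
      · rw [ht2]; omega
      · rw [ht2]; omega
      · rw [ht2]; omega

theorem loopB_eq (k : Nat) : ∀ (n val place : Int), n.toNat = k →
    loopB n val place = val + ((e k : Nat) : Int) * place := by
  induction k using Nat.strong_induction_on with
  | _ k ih =>
    intro n val place hk
    by_cases hpos : 0 < n
    · have hk1 : 1 ≤ k := by omega
      have hn : n = ((k : Nat) : Int) := by omega
      rw [loopB, dif_pos hpos]
      have hq : PySem.Int.floordiv (n - 1) 4 = (((k - 1) / 4 : Nat) : Int) := by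
        have h1 : n - 1 = (((k - 1 : Nat) : Nat) : Int) := by omega
        rw [h1]
        exact_mod_cast PySem.Int.floordiv_natCast (k - 1) 4
      have hr : PySem.Int.mod (n - 1) 4 = (((k - 1) % 4 : Nat) : Int) := by
        have h1 : n - 1 = (((k - 1 : Nat) : Nat) : Int) := by omega
        rw [h1]
        exact_mod_cast PySem.Int.mod_natCast (k - 1) 4
      rw [hq, hr]
      rw [PySem.List.pyGetD_natCast, getD_hypeDigits _ (by omega)]
      rw [ih ((k - 1) / 4) (by omega) _ _ _ (by omega)]
      have he : e k = 10 * e ((k - 1) / 4) + hdig ((k - 1) % 4) := by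
        have : k = (k - 1) + 1 := by omega
        rw [this, e_succ]
        congr 2 <;> omega
      rw [he]
      push_cast
      ring
    · have hk0 : k = 0 := by omega
      rw [loopB, dif_neg hpos, hk0, e_zero]
      simp

-- ===== VERDICT (by name: the statement is the Claim_ definition above) =====
theorem nthHypenumber_spec : Claim_equal_nthHypenumber := by
  intro numn _ hpre
  unfold Spec_nthHypenumber nthHypenumber nthHypenumber_alt
  have h1 : (1 : Int) ≤ numn := hpre
  have hK : 1 ≤ numn.toNat := by omega
  rw [loopB_eq numn.toNat numn 0 1 rfl]
  rw [loopA_inv (10 * numn.toNat * numn.toNat + 1) 0 2 numn (by norm_num) h1 (by norm_num)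
      (by simp [e_zero]) (by simp [e_one]) (by have := e_bound numn.toNat hK; omega)]
  ring
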